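-- pv_equiv track=rewrite | github.com/htphuocdl/Classification-trendingTwitter | sources/BagOfWord/libStemming.py | countVC
-- ===== SOURCE A (Python) =====
-- arrV ='ueoai'
--
-- def countVC(word): #[C](VC){m}[V]
-- 	if not word:
-- 		return 0
-- 	inum = 0
-- 	count = 0
-- 	leng = len(word)
-- 	while inum<leng-1:
-- 		if word[inum] in arrV: # if is V*
-- 			if word[inum+1] not in arrV: # is VC
-- 				count = count + 1
-- 				inum = inum + 2
-- 			else: # is VV
-- 				inum = inum + 1
-- 		else:
-- 			inum = inum + 1
-- 	return count
-- ===== SOURCE B (Python) =====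
-- arrV = 'ueoai'
--
-- def countVC(word):
--     return sum(1 for a, b in zip(word, word[1:]) if a in arrV and b not in arrV)
-- ===== Notes on version B (the rewrite author's own statement) =====
-- stated objective: simpler
-- what changed: B replaces A's index-driven while loop with conditional skip-by-2 advancement by a single pairwise count over zip(word, word[1:]); this is exact because a counted VC pair is followed by a consonant, which can never start another VC pair, so non-overlap bookkeeping is unnecessary.
import Mathlib
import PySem

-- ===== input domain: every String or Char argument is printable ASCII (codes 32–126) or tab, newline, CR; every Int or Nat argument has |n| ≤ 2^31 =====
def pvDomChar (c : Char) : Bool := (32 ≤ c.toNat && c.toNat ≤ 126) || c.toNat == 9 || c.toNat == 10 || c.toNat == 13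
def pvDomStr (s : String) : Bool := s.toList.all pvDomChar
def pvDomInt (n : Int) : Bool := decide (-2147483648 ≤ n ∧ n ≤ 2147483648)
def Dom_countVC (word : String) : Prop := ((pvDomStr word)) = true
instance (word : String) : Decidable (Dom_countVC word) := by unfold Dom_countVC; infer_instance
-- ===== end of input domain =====

-- B counts adjacent vowel→consonant pairs in one pairwise pass over zip(word, word[1:]),
-- replacing A's index-skipping while loop; objective: simpler (the skip bookkeeping is redundant).

-- 'c in arrV' for the module constant arrV = 'ueoai' (exact: the needle is a single character)
def inArrV (c : Char) : Bool := ("ueoai".toList).contains c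

-- ===== PORT A =====
-- the while loop of A: state (inum, count), guard inum < leng - 1;
-- fuel makes the recursion structural (fuel = len(word) always suffices: inum grows each step)
def countVCLoop (cs : List Char) (leng : Int) : Nat → Int → Int → Int
  | 0, _, count => count
  | Nat.succ fuel, inum, count =>
    if inum < leng - 1 then
      if inArrV (PySem.List.pyGetD cs inum ' ') then        -- if word[inum] in arrV
        if !inArrV (PySem.List.pyGetD cs (inum + 1) ' ') then  -- word[inum+1] not in arrV: VC
          countVCLoop cs leng fuel (inum + 2) (count + 1)
        else
          countVCLoop cs leng fuel (inum + 1) count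
      else
        countVCLoop cs leng fuel (inum + 1) count
    else count

def countVC (word : String) : Int :=
  if word.toList = [] then 0
  else countVCLoop word.toList (PySem.Str.len word) word.toList.length 0 0

-- ===== PORT B =====
def countVC_alt (word : String) : Int :=
  (((word.toList.zip (word.toList.drop 1)).countP
      (fun p => inArrV p.1 && !inArrV p.2) : Nat) : Int)

-- ===== PRECONDITION & SPEC =====
def Spec_countVC (word : String) (out : Int) : Prop := out = countVC_alt word
instance (word : String) (out : Int) : Decidable (Spec_countVC word out) := by unfold Spec_countVC; infer_instance

-- ===== CLAIM (what is proved, stated in full; the proofs are below) =====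
def Claim_equal_countVC : Prop := ∀ (word : String), Dom_countVC word → Spec_countVC word (countVC word)

-- ===== LEMMAS AND PROOFS =====

def pairP : Char × Char → Bool := fun p => inArrV p.1 && !inArrV p.2

lemma pairs_length (cs : List Char) : (cs.zip (cs.drop 1)).length = cs.length - 1 := by
  simp [List.length_zip]

lemma loop_eq (cs : List Char) : ∀ (k n : Nat) (count : Int), cs.length - n ≤ k →
    countVCLoop cs cs.length k n count =
      count + (((cs.zip (cs.drop 1)).drop n).countP pairP : Int) := by
  intro k
  induction k with
  | zero =>
    intro n count h
    rw [List.drop_eq_nil_of_le (by rw [pairs_length]; omega)]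
    simp [countVCLoop]
  | succ k ih =>
    intro n count h
    by_cases hg : ((n : Int) < (cs.length : Int) - 1)
    · have hn1 : n + 1 < cs.length := by omega
      have hn0 : n < cs.length := by omega
      have hp : n < (cs.zip (cs.drop 1)).length := by rw [pairs_length]; omega
      have hget : (cs.zip (cs.drop 1))[n] = (cs[n], cs[n+1]) := by
        simp [List.getElem_zip]
      have hd : (cs.zip (cs.drop 1)).drop n =
          (cs[n], cs[n+1]) :: (cs.zip (cs.drop 1)).drop (n+1) := by
        rw [List.drop_eq_getElem_cons hp, hget]
      have hget0 : PySem.List.pyGetD cs (n : Int) ' ' = cs[n] := by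
        simp [List.getElem?_eq_getElem hn0]
      have e1 : ((n : Int) + 1) = ((n + 1 : Nat) : Int) := by push_cast; ring
      have e2 : ((n : Int) + 2) = ((n + 2 : Nat) : Int) := by push_cast; ring
      have hget1 : PySem.List.pyGetD cs ((n : Int) + 1) ' ' = cs[n+1] := by
        rw [e1, PySem.List.pyGetD_natCast]
        simp [List.getD, List.getElem?_eq_getElem hn1]
      rw [countVCLoop, if_pos hg, hget0, hget1]
      by_cases hv : inArrV cs[n]
      · by_cases hc : inArrV cs[n+1]
        · -- VV: advance 1
          rw [if_pos hv, hc]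
          simp only [Bool.not_true, Bool.false_eq_true, if_false, e1]
          rw [ih (n+1) count (by omega), hd]
          have : pairP (cs[n], cs[n+1]) = false := by simp [pairP, hv, hc]
          simp [this]
        · -- VC: count and advance 2
          rw [if_pos hv]
          simp only [Bool.not_eq_true] at hc
          rw [hc]
          simp only [Bool.not_false, if_true, e2]
          rw [ih (n+2) (count+1) (by omega), hd]
          have hpp : pairP (cs[n], cs[n+1]) = true := by simp [pairP, hv, hc]
          have hskip : ((cs.zip (cs.drop 1)).drop (n+1)).countP pairP =
              ((cs.zip (cs.drop 1)).drop (n+2)).countP pairP := by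
            by_cases h2 : n + 1 < (cs.zip (cs.drop 1)).length
            · have hn2 : n + 2 < cs.length := by rw [pairs_length] at h2; omega
              have hget' : (cs.zip (cs.drop 1))[n+1] = (cs[n+1], cs[n+2]) := by
                simp [List.getElem_zip]
              rw [List.drop_eq_getElem_cons h2, hget']
              have : pairP (cs[n+1], cs[n+2]) = false := by simp [pairP, hc]
              simp [this]
            · rw [List.drop_eq_nil_of_le (by omega), List.drop_eq_nil_of_le (by omega)]
          simp only [List.countP_cons, hpp, if_true]
          rw [hskip]
          push_cast
          ring
      · -- C: advance 1
        rw [if_neg hv]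
        rw [e1, ih (n+1) count (by omega), hd]
        have : pairP (cs[n], cs[n+1]) = false := by simp [pairP, hv]
        simp [this]
    · rw [countVCLoop, if_neg hg]
      rw [List.drop_eq_nil_of_le (by rw [pairs_length]; omega)]
      simp

theorem countVC_eq_alt (word : String) : countVC word = countVC_alt word := by
  unfold countVC countVC_alt
  by_cases h : word.toList = []
  · simp [h]
  · rw [if_neg h]
    have hlen : PySem.Str.len word = (word.toList.length : Int) := by simp
    rw [hlen]
    have hl := loop_eq word.toList word.toList.length 0 0 (by omega)
    simp only [Nat.cast_zero, List.drop_zero, zero_add] at hl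
    rw [hl]
    rfl

-- ===== VERDICT (by name: the statement is the Claim_ definition above) =====
theorem countVC_spec : Claim_equal_countVC := by
  intro word _
  exact countVC_eq_alt word
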